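-- pv_equiv track=rewrite | github.com/arindhimar/BluePineapple | Python Programs/23-12-25/077.py | find_diff_bw_even_and_odd
-- ===== SOURCE A (Python) =====
-- def find_diff_bw_even_and_odd(n):
--     es=0
--     od=0
--
--     for i in str(abs(n)):
--         digit=int(i)
--         if digit % 2 == 0:
--             es+= digit
--         else:
--             od+=digit
--
--     return abs(es-od)
-- ===== SOURCE B (Python) =====
-- def find_diff_bw_even_and_odd(n):
--     # Signed digit sum: each digit d contributes (-1)**d * d, i.e. +d when even,
--     # -d when odd, so |sum| is the requested difference; computed recursively.
--     def signed(m):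
--         if m == 0:
--             return 0
--         d = m % 10
--         return (-1) ** d * d + signed(m // 10)
--     return abs(signed(abs(n)))
-- ===== Notes on version B (the rewrite author's own statement) =====
-- stated objective: alternative
-- what changed: Replaces the string iteration with two even/odd accumulators and a branch by a recursive signed digit sum where each digit d contributes (-1)**d * d, returning the absolute value of that single sum.
import Mathlib
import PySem

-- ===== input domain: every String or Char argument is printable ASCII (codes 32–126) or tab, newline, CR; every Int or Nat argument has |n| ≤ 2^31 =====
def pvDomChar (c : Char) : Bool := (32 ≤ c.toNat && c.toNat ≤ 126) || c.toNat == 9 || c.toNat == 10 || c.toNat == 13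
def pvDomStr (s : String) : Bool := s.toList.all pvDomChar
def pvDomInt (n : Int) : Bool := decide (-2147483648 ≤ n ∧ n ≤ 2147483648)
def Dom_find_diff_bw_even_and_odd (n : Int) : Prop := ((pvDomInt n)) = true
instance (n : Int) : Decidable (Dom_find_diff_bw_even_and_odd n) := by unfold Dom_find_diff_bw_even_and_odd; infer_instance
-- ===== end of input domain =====

-- B replaces A's two even/odd accumulators over the characters of str(abs(n)) by a
-- recursive signed digit sum (each digit d contributes (-1)^d * d); alternative, same cost.

-- ===== PORT A =====
-- one step of A's for-loop body; int(i) on the single digit character i is ported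
-- as c.toNat - 48, exact on the digit characters '0'..'9' produced by str(abs(n))
def pvStepA (p : Int × Int) (c : Char) : Int × Int :=
  let digit : Int := (c.toNat : Int) - 48
  if PySem.Int.mod digit 2 == 0 then (p.1 + digit, p.2) else (p.1, p.2 + digit)

def find_diff_bw_even_and_odd (n : Int) : Int :=
  let p := (PySem.Int.toChars |n|).foldl pvStepA (0, 0)
  |p.1 - p.2|

-- ===== PORT B =====
-- the recursive helper signed(m) of Source B: (-1)**(m%10) * (m%10) + signed(m//10)
def pvSigned (m : Nat) : Int :=
  if m = 0 then 0
  else (-1) ^ (m % 10) * ((m % 10 : Nat) : Int) + pvSigned (m / 10)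
  termination_by m
  decreasing_by exact Nat.div_lt_self (Nat.pos_of_ne_zero (by assumption)) (by norm_num)

def find_diff_bw_even_and_odd_alt (n : Int) : Int :=
  |pvSigned n.natAbs|

-- ===== PRECONDITION & SPEC =====
def Spec_find_diff_bw_even_and_odd (n : Int) (out : Int) : Prop := out = find_diff_bw_even_and_odd_alt n
instance (n : Int) (out : Int) : Decidable (Spec_find_diff_bw_even_and_odd n out) := by unfold Spec_find_diff_bw_even_and_odd; infer_instance

-- ===== CLAIM (what is proved, stated in full; the proofs are below) =====
def Claim_equal_find_diff_bw_even_and_odd : Prop := ∀ (n : Int), Dom_find_diff_bw_even_and_odd n → Spec_find_diff_bw_even_and_odd n (find_diff_bw_even_and_odd n)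

-- ===== LEMMAS AND PROOFS =====

-- sum of the even (resp. odd) decimal digits of m
def pvE (m : Nat) : Int :=
  if m = 0 then 0
  else (if m % 10 % 2 = 0 then ((m % 10 : Nat) : Int) else 0) + pvE (m / 10)
  termination_by m
  decreasing_by exact Nat.div_lt_self (Nat.pos_of_ne_zero (by assumption)) (by norm_num)

def pvO (m : Nat) : Int :=
  if m = 0 then 0
  else (if m % 10 % 2 = 0 then 0 else ((m % 10 : Nat) : Int)) + pvO (m / 10)
  termination_by m
  decreasing_by exact Nat.div_lt_self (Nat.pos_of_ne_zero (by assumption)) (by norm_num)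

theorem pvStepA_digitChar (k : Nat) (hk : k < 10) (es od : Int) :
    pvStepA (es, od) (Nat.digitChar k) =
      (es + (if k % 2 = 0 then (k : Int) else 0), od + (if k % 2 = 0 then 0 else (k : Int))) := by
  have h48 : ∀ j, j < 10 → ((Nat.digitChar j).toNat : Int) - 48 = (j : Int) := by decide
  by_cases hk2 : k % 2 = 0
  · simp [pvStepA, h48 k hk, hk2]
    omega
  · simp [pvStepA, h48 k hk, hk2]
    omega

theorem pvSigned_eq (m : Nat) : pvSigned m = pvE m - pvO m := by
  induction m using Nat.strong_induction_on with
  | _ m ih =>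
    rw [pvSigned, pvE, pvO]
    by_cases h : m = 0
    · simp [h]
    · have hlt : m / 10 < m := Nat.div_lt_self (Nat.pos_of_ne_zero h) (by norm_num)
      simp only [if_neg h, ih _ hlt]
      by_cases he : m % 10 % 2 = 0
      · rw [Even.neg_one_pow (Nat.even_iff.mpr he), if_pos he, if_pos he]
        ring
      · rw [Odd.neg_one_pow (Nat.odd_iff.mpr (by omega)), if_neg he, if_neg he]
        ring

theorem foldl_toDigitsCore (f : Nat) : ∀ (m : Nat) (acc : List Char) (es od : Int), m < f →
    (Nat.toDigitsCore 10 f m acc).foldl pvStepA (es, od) =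
      acc.foldl pvStepA (es + pvE m, od + pvO m) := by
  induction f with
  | zero => intro m acc es od h; omega
  | succ f ih =>
      intro m acc es od h
      rw [Nat.toDigitsCore]
      by_cases h0 : m / 10 = 0
      · have hm10 : m < 10 := by omega
        simp only [h0, if_true]
        rw [List.foldl_cons, pvStepA_digitChar (m % 10) (by omega)]
        have hmm : m % 10 = m := Nat.mod_eq_of_lt hm10
        by_cases hz : m = 0
        · subst hz; simp [pvE, pvO]
        · rw [pvE, pvO]; simp [hz, h0, hmm, pvE, pvO]
      · simp only [if_neg h0]
        have hmf : m / 10 < f := by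
          have h1 : m / 10 < m := Nat.div_lt_self (by omega) (by norm_num)
          omega
        rw [ih (m / 10) _ es od hmf, List.foldl_cons,
          pvStepA_digitChar (m % 10) (by omega)]
        have hz : m ≠ 0 := by
          intro hz; subst hz; simp at h0
        conv_rhs => rw [pvE, pvO]
        simp only [if_neg hz]
        by_cases he : m % 10 % 2 = 0 <;> simp [he] <;> ring_nf

theorem foldl_toDigits (m : Nat) :
    (Nat.toDigits 10 m).foldl pvStepA ((0 : Int), (0 : Int)) = (pvE m, pvO m) := by
  rw [Nat.toDigits]
  rw [foldl_toDigitsCore (m + 1) m [] 0 0 (by omega)]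
  simp

-- ===== VERDICT (by name: the statement is the Claim_ definition above) =====
theorem find_diff_bw_even_and_odd_spec : Claim_equal_find_diff_bw_even_and_odd := by
  intro n _
  unfold Spec_find_diff_bw_even_and_odd find_diff_bw_even_and_odd find_diff_bw_even_and_odd_alt
  simp only [PySem.Int.toChars]
  have hnn : ¬ (|n| < 0) := Int.not_lt.mpr (abs_nonneg n)
  rw [if_neg hnn, show |n| = ((n.natAbs : Int)) from Int.abs_eq_natAbs n,
    Int.toNat_natCast, foldl_toDigits, pvSigned_eq]
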